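-- pv_equiv track=rewrite | github.com/limanjohnson/RLG-Discovery_App_Render-API-and-Worpress-Integration | logic.py | prefix_excluding_last_n_digits
-- ===== SOURCE A (Python) =====
-- def prefix_excluding_last_n_digits(s: str, n: int) -> str:
--     if n <= 0:
--         return s
--     digits_seen = 0
--     for i in range(len(s) - 1, -1, -1):
--         if s[i].isdigit():
--             digits_seen += 1
--             if digits_seen == n:
--                 return s[:i]
--     return ""
-- ===== SOURCE B (Python) =====
-- def prefix_excluding_last_n_digits(s: str, n: int) -> str:
--     if n <= 0:
--         return s
--     positions = [i for i, ch in enumerate(s) if ch.isdigit()]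
--     if len(positions) < n:
--         return ""
--     return s[:positions[-n]]
-- ===== Notes on version B (the rewrite author's own statement) =====
-- stated objective: alternative
-- what changed: Replaces the backward scan with a running digit counter and early return by a forward pass collecting all digit indices, then selecting the n-th-from-last position and slicing.
import Mathlib
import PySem

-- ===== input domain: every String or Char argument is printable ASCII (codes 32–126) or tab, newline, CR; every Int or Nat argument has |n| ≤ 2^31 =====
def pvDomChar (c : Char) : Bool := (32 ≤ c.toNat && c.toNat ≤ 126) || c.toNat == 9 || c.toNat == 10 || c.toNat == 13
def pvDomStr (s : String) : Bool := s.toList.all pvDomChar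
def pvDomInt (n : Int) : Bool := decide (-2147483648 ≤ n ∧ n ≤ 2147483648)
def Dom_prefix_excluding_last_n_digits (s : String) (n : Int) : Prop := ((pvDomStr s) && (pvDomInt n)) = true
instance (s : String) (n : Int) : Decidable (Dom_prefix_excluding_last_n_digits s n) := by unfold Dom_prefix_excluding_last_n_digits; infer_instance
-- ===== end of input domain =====

-- B replaces A's backward scan with an early-return counter by a forward pass that
-- collects all digit indices and then slices at the n-th-from-last one (objective: alternative).

-- ===== PORT A =====
-- backward loop of A: `i` is (current index)+1, `d` is digits_seen
def pvLoopA (cs : List Char) (n : Nat) : Nat → Nat → String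
  | 0, _ => ""
  | (i+1), d =>
      if (cs.getD i ' ').isDigit then
        (if d + 1 = n then String.ofList (cs.take i) else pvLoopA cs n i (d + 1))
      else pvLoopA cs n i d

def prefix_excluding_last_n_digits (s : String) (n : Int) : String :=
  if n ≤ 0 then s
  else pvLoopA s.toList n.toNat s.toList.length 0

-- ===== PORT B =====
def prefix_excluding_last_n_digits_alt (s : String) (n : Int) : String :=
  if n ≤ 0 then s
  else
    let cs := s.toList
    let positions := (List.range cs.length).filter (fun i => (cs.getD i ' ').isDigit)
    if positions.length < n.toNat then ""
    else String.ofList (cs.take (positions.getD (positions.length - n.toNat) 0))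

-- ===== PRECONDITION & SPEC =====
def Spec_prefix_excluding_last_n_digits (s : String) (n : Int) (out : String) : Prop := out = prefix_excluding_last_n_digits_alt s n
instance (s : String) (n : Int) (out : String) : Decidable (Spec_prefix_excluding_last_n_digits s n out) := by unfold Spec_prefix_excluding_last_n_digits; infer_instance

-- ===== CLAIM (what is proved, stated in full; the proofs are below) =====
def Claim_equal_prefix_excluding_last_n_digits : Prop := ∀ (s : String) (n : Int), Dom_prefix_excluding_last_n_digits s n → Spec_prefix_excluding_last_n_digits s n (prefix_excluding_last_n_digits s n)

-- ===== LEMMAS AND PROOFS =====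

theorem pv_getD_append_left {P : List Nat} {x : Nat} {j : Nat} (h : j < P.length) :
    (P ++ [x]).getD j 0 = P.getD j 0 := by
  simp [List.getD, List.getElem?_append_left h]

theorem pv_getD_append_last (P : List Nat) (x : Nat) :
    (P ++ [x]).getD P.length 0 = x := by
  simp [List.getD]

-- loop invariant: A's backward scan from index i-1 with d digits already seen equals
-- the select-from-collected-positions computation restricted to indices < i
theorem pvLoopA_eq (cs : List Char) (n : Nat) :
    ∀ (i d : Nat), d < n →
      pvLoopA cs n i d =
        (let P := (List.range i).filter (fun j => (cs.getD j ' ').isDigit)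
         if P.length + d < n then ""
         else String.ofList (cs.take (P.getD (P.length + d - n) 0))) := by
  intro i
  induction i with
  | zero =>
      intro d hd
      simp [pvLoopA]
  | succ i ih =>
      intro d hd
      have hr : List.range (i+1) = List.range i ++ [i] := List.range_succ
      by_cases hdig : (cs[i]?.getD ' ').isDigit
      · set P := (List.range i).filter (fun j => (cs.getD j ' ').isDigit) with hP
        have hP' : (List.range (i+1)).filter (fun j => (cs.getD j ' ').isDigit) = P ++ [i] := by
          rw [hr, List.filter_append]
          simp [List.getD, hdig, hP]
        by_cases hn : d + 1 = n
        · -- early return: the newly found digit is the n-th from the end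
          have : pvLoopA cs n (i+1) d = String.ofList (cs.take i) := by
            simp [pvLoopA, List.getD, hdig, hn]
          rw [this]
          simp only [hP']
          have hlen : (P ++ [i]).length = P.length + 1 := by simp
          rw [hlen]
          have hcond : ¬ (P.length + 1 + d < n) := by omega
          rw [if_neg hcond]
          have hidx : P.length + 1 + d - n = P.length := by omega
          rw [hidx, pv_getD_append_last]
        · have hstep : pvLoopA cs n (i+1) d = pvLoopA cs n i (d+1) := by
            simp [pvLoopA, List.getD, hdig, hn]
          rw [hstep, ih (d+1) (by omega)]
          simp only [hP']
          have hlen : (P ++ [i]).length = P.length + 1 := by simp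
          rw [hlen]
          by_cases hc : P.length + (d+1) < n
          · rw [if_pos hc, if_pos (by omega)]
          · rw [if_neg hc, if_neg (by omega)]
            have hlt : P.length + 1 + d - n < P.length := by omega
            rw [pv_getD_append_left hlt]
            have : P.length + 1 + d - n = P.length + (d+1) - n := by omega
            rw [this]
      · have hstep : pvLoopA cs n (i+1) d = pvLoopA cs n i d := by
          simp [pvLoopA, List.getD, hdig]
        have hP' : (List.range (i+1)).filter (fun j => (cs.getD j ' ').isDigit)
            = (List.range i).filter (fun j => (cs.getD j ' ').isDigit) := by
          rw [hr, List.filter_append]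
          simp [List.getD, hdig]
        rw [hstep, ih d hd]
        simp only [hP']

-- ===== VERDICT (by name: the statement is the Claim_ definition above) =====
theorem prefix_excluding_last_n_digits_spec : Claim_equal_prefix_excluding_last_n_digits := by
  intro s n _
  unfold Spec_prefix_excluding_last_n_digits prefix_excluding_last_n_digits prefix_excluding_last_n_digits_alt
  by_cases hn : n ≤ 0
  · simp [hn]
  · have hpos : 0 < n.toNat := by omega
    rw [if_neg hn, if_neg hn]
    rw [pvLoopA_eq s.toList n.toNat s.toList.length 0 hpos]
    simp
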